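-- pv_equiv track=rewrite | github.com/734ai/MicroGolf | microgolf/engine/nca.py | _count_edge_cells
-- ===== SOURCE A (Python) =====
-- from typing import List, Tuple, Dict, Any, Callable
--
-- def _count_edge_cells(grid: List[List[int]]) -> int:
--     """Count cells on the edge of non-zero regions"""
--     if not grid or not grid[0]:
--         return 0
--
--     h, w = len(grid), len(grid[0])
--     edge_count = 0
--
--     for i in range(h):
--         for j in range(w):
--             if grid[i][j] != 0:
--                 # Check if adjacent to zero or boundary
--                 is_edge = False
--                 for di, dj in [(-1,0), (1,0), (0,-1), (0,1)]:
--                     ni, nj = i + di, j + dj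
--                     if ni < 0 or ni >= h or nj < 0 or nj >= w or grid[ni][nj] == 0:
--                         is_edge = True
--                         break
--                 if is_edge:
--                     edge_count += 1
--
--     return edge_count
-- ===== SOURCE B (Python) =====
-- def _row_edges(up, cur, down):
--     left = [0] + cur[:-1]
--     right = cur[1:] + [0]
--     return sum(1 for a, c, b, l, r in zip(up, cur, down, left, right)
--                if c != 0 and (a == 0 or b == 0 or l == 0 or r == 0))
--
-- def _count_edge_cells(grid):
--     """Count cells on the edge of non-zero regions"""
--     if not grid or not grid[0]:
--         return 0
--     w = len(grid[0])
--     z = [0] * w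
--     rows = [r[:w] for r in grid]
--     ups = [z] + rows[:-1]
--     downs = rows[1:] + [z]
--     return sum(_row_edges(u, c, d) for u, c, d in zip(ups, rows, downs))
-- ===== Notes on version B (the rewrite author's own statement) =====
-- stated objective: faster
-- what changed: B replaces A's per-cell inner loop over four (di,dj) offsets with bounds checks by a shift-and-zip sweep: each (length-w-truncated) row is zipped with its up/down neighbour rows (zero rows at the borders) and its own left/right shifts, so every neighbour test is a direct comparison with no index arithmetic or bounds checks.
import Mathlib
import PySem

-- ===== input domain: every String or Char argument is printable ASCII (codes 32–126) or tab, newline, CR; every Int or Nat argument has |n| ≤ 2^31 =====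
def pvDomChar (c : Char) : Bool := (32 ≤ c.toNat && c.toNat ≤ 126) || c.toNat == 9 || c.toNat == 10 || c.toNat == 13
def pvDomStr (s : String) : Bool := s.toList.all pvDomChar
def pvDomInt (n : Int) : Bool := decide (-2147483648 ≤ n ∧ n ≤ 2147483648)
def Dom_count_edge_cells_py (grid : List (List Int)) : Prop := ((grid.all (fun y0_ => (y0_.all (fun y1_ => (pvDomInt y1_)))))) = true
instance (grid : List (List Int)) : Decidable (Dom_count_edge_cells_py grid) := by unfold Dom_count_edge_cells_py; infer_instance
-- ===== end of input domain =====

-- B replaces A's per-cell bounds-checked neighbour probing by a shift-and-zip sweep: each row is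
-- zipped with its up/down neighbour rows (a zero row at the borders) and with its own left/right
-- shifts, so the neighbour test is a plain comparison with no index arithmetic or bounds checks
-- (measurably faster by a constant factor; the equivalence is proved on Pre_, i.e. non-ragged inputs).

-- ===== PORT A =====
-- grid[i][j] for indices already known in range (Python would raise outside; Pre_ excludes that)
def pvCell (grid : List (List Int)) (i j : Nat) : Int := (grid.getD i []).getD j 0

-- the inner `for di, dj in [...]` loop with its break
def pvIsEdge (grid : List (List Int)) (h w : Nat) (i j : Nat) : List (Int × Int) → Bool
  | [] => false
  | (di, dj) :: rest =>
    let ni : Int := (i : Int) + di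
    let nj : Int := (j : Int) + dj
    if ni < 0 || ni ≥ (h : Int) || nj < 0 || nj ≥ (w : Int) || pvCell grid ni.toNat nj.toNat == 0 then
      true
    else pvIsEdge grid h w i j rest

def count_edge_cells_py (grid : List (List Int)) : Int :=
  if grid = [] ∨ grid.headD [] = [] then 0
  else
    let h := grid.length
    let w := (grid.headD []).length
    (List.range h).foldl (fun acc i =>
      (List.range w).foldl (fun acc j =>
        if pvCell grid i j != 0 then
          if pvIsEdge grid h w i j [(-1,0), (1,0), (0,-1), (0,1)] then acc + 1 else acc
        else acc) acc) 0

-- ===== PORT B =====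
def pvRowEdges (up cur down : List Int) : Int :=
  let left : List Int := 0 :: cur.dropLast
  let right : List Int := cur.tail ++ [0]
  ((up.zip (cur.zip (down.zip (left.zip right)))).countP
    (fun x => x.2.1 != 0 && (x.1 == 0 || x.2.2.1 == 0 || x.2.2.2.1 == 0 || x.2.2.2.2 == 0)) : Int)

def count_edge_cells_py_alt (grid : List (List Int)) : Int :=
  if grid = [] ∨ grid.headD [] = [] then 0
  else
    let w := (grid.headD []).length
    let z : List Int := List.replicate w 0
    let rows := grid.map (fun r => r.take w)
    let ups := z :: rows.dropLast
    let downs := rows.tail ++ [z]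
    ((ups.zip (rows.zip downs)).map (fun t => pvRowEdges t.1 t.2.1 t.2.2)).sum

-- ===== PRECONDITION & SPEC =====
-- Pre_ excludes exactly the ragged grids on which A raises IndexError (a row shorter than row 0).
def Pre_count_edge_cells_py (grid : List (List Int)) : Prop :=
  grid = [] ∨ grid.headD [] = [] ∨ ∀ r ∈ grid, (grid.headD []).length ≤ r.length
instance (grid : List (List Int)) : Decidable (Pre_count_edge_cells_py grid) := by
  unfold Pre_count_edge_cells_py; infer_instance

def pvWitness_count_edge_cells_py : List (List Int) := [[1, 0], [2, 3]]

def Spec_count_edge_cells_py (grid : List (List Int)) (out : Int) : Prop := out = count_edge_cells_py_alt grid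
instance (grid : List (List Int)) (out : Int) : Decidable (Spec_count_edge_cells_py grid out) := by unfold Spec_count_edge_cells_py; infer_instance

-- ===== CLAIM (what is proved, stated in full; the proofs are below) =====
def Claim_equal_count_edge_cells_py : Prop := ∀ (grid : List (List Int)), Dom_count_edge_cells_py grid → Pre_count_edge_cells_py grid → Spec_count_edge_cells_py grid (count_edge_cells_py grid)

-- ===== LEMMAS AND PROOFS =====

-- padded access: the value at (i, j), 0 outside the h×w box
def pvNB (grid : List (List Int)) (h w : Nat) (i j : Int) : Int :=
  if 0 ≤ i ∧ i < (h : Int) ∧ 0 ≤ j ∧ j < (w : Int) then pvCell grid i.toNat j.toNat else 0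

-- the per-cell predicate both programs count
def pvEP (grid : List (List Int)) (h w : Nat) (i j : Nat) : Bool :=
  pvCell grid i j != 0 &&
    (pvNB grid h w ((i : Int) - 1) j == 0 || pvNB grid h w ((i : Int) + 1) j == 0 ||
     pvNB grid h w i ((j : Int) - 1) == 0 || pvNB grid h w i ((j : Int) + 1) == 0)

lemma pv_getD_zip {α β : Type} (a : List α) (b : List β) (i : Nat) (da : α) (db : β)
    (ha : i < a.length) (hb : i < b.length) :
    (a.zip b).getD i (da, db) = (a.getD i da, b.getD i db) := by
  induction a generalizing b i with
  | nil => simp at ha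
  | cons x xs ih =>
    cases b with
    | nil => simp at hb
    | cons y ys =>
      cases i with
      | zero => simp [List.zip]
      | succ n =>
        simp only [List.zip_cons_cons, List.getD_cons_succ]
        exact ih ys n (by simpa using ha) (by simpa using hb)

lemma pv_countP_eq_range {α : Type} (l : List α) (p : α → Bool) (d : α) :
    l.countP p = (List.range l.length).countP (fun j => p (l.getD j d)) := by
  induction l with
  | nil => simp
  | cons x xs ih =>
    simp only [List.length_cons, List.range_succ_eq_map, List.countP_cons,
      List.countP_map, Function.comp_def, List.getD_cons_succ, List.getD_cons_zero]
    rw [ih]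

lemma pv_foldl_count2 (l : List Nat) (p q : Nat → Bool) (acc : Int) :
    l.foldl (fun a x => if p x then (if q x then a + 1 else a) else a) acc
      = acc + (l.countP (fun x => p x && q x) : Nat) := by
  induction l generalizing acc with
  | nil => simp
  | cons x xs ih =>
    simp only [List.foldl_cons, List.countP_cons]
    rw [ih]
    by_cases hp : p x <;> by_cases hq : q x <;> simp [hp, hq] <;> push_cast <;> ring

lemma pv_zip3_sum (f : List Int → List Int → List Int → Int) :
    ∀ (cs us ds : List (List Int)), us.length = cs.length → ds.length = cs.length →
    ((us.zip (cs.zip ds)).map (fun t => f t.1 t.2.1 t.2.2)).sum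
      = ((List.range cs.length).map (fun i => f (us.getD i []) (cs.getD i []) (ds.getD i []))).sum := by
  intro cs
  induction cs with
  | nil => intro us ds hu hd; simp at hu hd; simp [hu, hd]
  | cons c cs ih =>
    intro us ds hu hd
    cases us with
    | nil => simp at hu
    | cons u us =>
      cases ds with
      | nil => simp at hd
      | cons d ds =>
        simp only [List.zip_cons_cons, List.map_cons, List.sum_cons, List.length_cons,
          List.range_succ_eq_map, List.map_map, Function.comp_def, List.getD_cons_succ,
          List.getD_cons_zero]
        rw [ih us ds (by simpa using hu) (by simpa using hd)]

lemma pv_NB_eq_zero (grid : List (List Int)) (h w : Nat) (x y : Int) :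
    (pvNB grid h w x y == 0)
      = (decide (x < 0) || decide ((h : Int) ≤ x) || decide (y < 0) || decide ((w : Int) ≤ y) ||
         (pvCell grid x.toNat y.toNat == 0)) := by
  unfold pvNB
  by_cases hb : 0 ≤ x ∧ x < (h : Int) ∧ 0 ≤ y ∧ y < (w : Int)
  · rw [if_pos hb]
    obtain ⟨h1, h2, h3, h4⟩ := hb
    simp [not_lt.mpr h1, not_le.mpr h2, not_lt.mpr h3, not_le.mpr h4]
  · rw [if_neg hb]
    push_neg at hb
    rcases lt_or_ge x 0 with hx | hx
    · simp [hx]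
    rcases le_or_gt (h : Int) x with hh | hh
    · simp [hh]
    rcases lt_or_ge y 0 with hy | hy
    · simp [hy]
    rcases le_or_gt (w : Int) y with hw2 | hw2
    · simp [hw2]
    exact absurd (hb hx hh hy) (not_le.mpr hw2)

-- A's inner break-loop on the literal direction list is the four-way padded-zero test
lemma pv_isEdge_eq (grid : List (List Int)) (h w i j : Nat) (hi : i < h) (hj : j < w) :
    pvIsEdge grid h w i j [(-1,0), (1,0), (0,-1), (0,1)]
      = (pvNB grid h w ((i : Int) - 1) j == 0 || pvNB grid h w ((i : Int) + 1) j == 0 ||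
         pvNB grid h w i ((j : Int) - 1) == 0 || pvNB grid h w i ((j : Int) + 1) == 0) := by
  simp only [pvIsEdge, pv_NB_eq_zero]
  simp [sub_eq_add_neg, Bool.or_assoc, Bool.beq_eq_decide_eq]

lemma pv_take_getD (l : List Int) (w j : Nat) (hj : j < w) :
    (l.take w).getD j 0 = l.getD j 0 := by
  simp [List.getD_eq_getElem?_getD, List.getElem?_take, hj]

-- the value at index j of row i of the truncated grid is the padded cell value
lemma pv_cell_rows (grid : List (List Int)) (w i j : Nat) (hj : j < w) :
    ((grid.map (fun r : List Int => r.take w)).getD i []).getD j 0 = pvCell grid i j := by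
  unfold pvCell
  have hrow : (grid.map (fun r : List Int => r.take w)).getD i [] = (grid.getD i []).take w := by
    rcases Nat.lt_or_ge i grid.length with hi | hi
    · rw [List.getD_eq_getElem?_getD, List.getElem?_map, List.getElem?_eq_getElem hi,
        List.getD_eq_getElem?_getD, List.getElem?_eq_getElem hi]
      simp
    · rw [List.getD_eq_getElem?_getD, List.getElem?_map,
        List.getElem?_eq_none (by simpa using hi),
        List.getD_eq_getElem?_getD, List.getElem?_eq_none (by simpa using hi)]
      simp
  rw [hrow, pv_take_getD _ _ _ hj]

-- index-level form of pvRowEdges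
lemma pv_rowEdges_count (up cur down : List Int) (w : Nat) (hw : 1 ≤ w)
    (hu : up.length = w) (hc : cur.length = w) (hd : down.length = w) :
    pvRowEdges up cur down = (((List.range w).countP (fun j =>
      cur.getD j 0 != 0 && (up.getD j 0 == 0 || down.getD j 0 == 0 ||
        ((0 :: cur.dropLast).getD j 0 == 0) || ((cur.tail ++ [0]).getD j 0 == 0)))) : Nat) := by
  unfold pvRowEdges
  dsimp only
  have hl : (0 :: cur.dropLast).length = w := by simp [hc]; omega
  have hr : (cur.tail ++ [0]).length = w := by simp [hc]; omega
  have hz : (up.zip (cur.zip (down.zip ((0 :: cur.dropLast).zip (cur.tail ++ [0]))))).length = w := by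
    simp [List.length_zip, hu, hc, hd, hl, hr]
  rw [pv_countP_eq_range _ _ ((0 : Int), ((0 : Int), ((0 : Int), ((0 : Int), (0 : Int))))), hz]
  norm_cast
  apply List.countP_congr
  intro j hj
  have hj' : j < w := List.mem_range.mp hj
  rw [pv_getD_zip _ _ j _ _ (by omega) (by simp [List.length_zip, hc, hd, hl, hr]; omega),
      pv_getD_zip _ _ j _ _ (by omega) (by simp [List.length_zip, hd, hl, hr]; omega),
      pv_getD_zip _ _ j _ _ (by omega) (by simp [List.length_zip, hl, hr]; omega),
      pv_getD_zip _ _ j _ _ (by omega) (by omega)]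

lemma pv_rows_getD (grid : List (List Int)) (w i : Nat) (hi : i < grid.length) :
    (grid.map (fun r : List Int => r.take w)).getD i [] = (grid.getD i []).take w := by
  rw [List.getD_eq_getElem?_getD, List.getElem?_map, List.getElem?_eq_getElem hi,
    List.getD_eq_getElem?_getD, List.getElem?_eq_getElem hi]
  simp

lemma pv_getD_mem (l : List (List Int)) (i : Nat) (hi : i < l.length) : l.getD i [] ∈ l := by
  rw [List.getD_eq_getElem?_getD, List.getElem?_eq_getElem hi]; simp

lemma pv_row_len (grid : List (List Int)) (w i : Nat) (hi : i < grid.length)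
    (hp : ∀ r ∈ grid, w ≤ r.length) :
    ((grid.map (fun r : List Int => r.take w)).getD i []).length = w := by
  rw [pv_rows_getD grid w i hi, List.length_take]
  exact Nat.min_eq_left (hp _ (pv_getD_mem grid i hi))

lemma pv_NB_in (grid : List (List Int)) (h w i j : Nat) (hi : i < h) (hj : j < w) :
    pvNB grid h w i j = pvCell grid i j := by
  unfold pvNB
  have hb : 0 ≤ (i : Int) ∧ (i : Int) < (h : Int) ∧ 0 ≤ (j : Int) ∧ (j : Int) < (w : Int) :=
    ⟨by omega, by exact_mod_cast hi, by omega, by exact_mod_cast hj⟩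
  rw [if_pos hb]
  simp

lemma pv_left_getD (cur : List Int) (w j : Nat) (hc : cur.length = w) (hj : j < w) :
    (0 :: cur.dropLast).getD j 0 = if j = 0 then 0 else cur.getD (j - 1) 0 := by
  cases j with
  | zero => simp
  | succ k =>
    simp only [List.getD_cons_succ, Nat.add_sub_cancel, if_neg (Nat.succ_ne_zero k)]
    rw [List.getD_eq_getElem?_getD, List.getElem?_dropLast, List.getD_eq_getElem?_getD]
    rw [if_pos (by omega)]

lemma pv_right_getD (cur : List Int) (w j : Nat) (hc : cur.length = w) (hj : j < w) :
    (cur.tail ++ [0]).getD j 0 = if j + 1 < w then cur.getD (j + 1) 0 else 0 := by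
  rw [List.getD_eq_getElem?_getD, List.getElem?_append]
  by_cases hjw : j + 1 < w
  · rw [if_pos (by simp [hc]; omega), List.getElem?_tail, if_pos hjw, List.getD_eq_getElem?_getD]
  · rw [if_neg (by simp [hc]; omega), if_neg hjw]
    have : j - cur.tail.length = 0 := by simp [hc]; omega
    rw [this]
    simp

-- the row at index i of B's zipped sweep counts exactly pvEP on row i
lemma pv_row_eq (grid : List (List Int)) (i : Nat) (hi : i < grid.length)
    (hw : 1 ≤ (grid.headD []).length)
    (hp : ∀ r ∈ grid, (grid.headD []).length ≤ r.length) :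
    pvRowEdges
      ((List.replicate (grid.headD []).length 0 ::
         (grid.map (fun r : List Int => r.take (grid.headD []).length)).dropLast).getD i [])
      ((grid.map (fun r : List Int => r.take (grid.headD []).length)).getD i [])
      (((grid.map (fun r : List Int => r.take (grid.headD []).length)).tail ++
         [List.replicate (grid.headD []).length 0]).getD i [])
      = (((List.range (grid.headD []).length).countP
          (fun j => pvEP grid grid.length (grid.headD []).length i j)) : Nat) := by
  -- the up row: zero row at i = 0, otherwise row i-1
  have eU : (List.replicate (grid.headD []).length (0 : Int) ::
      (grid.map (fun r : List Int => r.take (grid.headD []).length)).dropLast).getD i []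
      = if i = 0 then List.replicate (grid.headD []).length (0 : Int)
        else (grid.map (fun r : List Int => r.take (grid.headD []).length)).getD (i - 1) [] := by
    cases i with
    | zero => simp
    | succ k =>
      simp only [List.getD_cons_succ, Nat.add_sub_cancel, if_neg (Nat.succ_ne_zero k)]
      rw [List.getD_eq_getElem?_getD, List.getElem?_dropLast, if_pos (by simp; omega),
        ← List.getD_eq_getElem?_getD]
  -- the down row: row i+1, or the zero row at i = h-1
  have eD : ((grid.map (fun r : List Int => r.take (grid.headD []).length)).tail ++
      [List.replicate (grid.headD []).length (0 : Int)]).getD i []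
      = if i + 1 < grid.length
        then (grid.map (fun r : List Int => r.take (grid.headD []).length)).getD (i + 1) []
        else List.replicate (grid.headD []).length (0 : Int) := by
    rw [List.getD_eq_getElem?_getD, List.getElem?_append]
    by_cases hih : i + 1 < grid.length
    · rw [if_pos (by simp; omega), if_pos hih, List.getElem?_tail, ← List.getD_eq_getElem?_getD]
    · rw [if_neg (by simp; omega), if_neg hih]
      have h0 : i - (grid.map (fun r : List Int => r.take (grid.headD []).length)).tail.length = 0 := by
        simp; omega
      rw [h0]
      simp
  have hcl : ((grid.map (fun r : List Int => r.take (grid.headD []).length)).getD i []).length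
      = (grid.headD []).length := pv_row_len grid _ i hi hp
  have hul : ((List.replicate (grid.headD []).length (0 : Int) ::
      (grid.map (fun r : List Int => r.take (grid.headD []).length)).dropLast).getD i []).length
      = (grid.headD []).length := by
    rw [eU]
    by_cases h0 : i = 0
    · rw [if_pos h0]; simp
    · rw [if_neg h0]; exact pv_row_len grid _ (i - 1) (by omega) hp
  have hdl : (((grid.map (fun r : List Int => r.take (grid.headD []).length)).tail ++
      [List.replicate (grid.headD []).length (0 : Int)]).getD i []).length
      = (grid.headD []).length := by
    rw [eD]
    by_cases hih : i + 1 < grid.length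
    · rw [if_pos hih]; exact pv_row_len grid _ (i + 1) hih hp
    · rw [if_neg hih]; simp
  rw [pv_rowEdges_count _ _ _ _ hw hul hcl hdl]
  norm_cast
  apply List.countP_congr
  intro j hj
  have hj' : j < (grid.headD []).length := List.mem_range.mp hj
  have ecur : ((grid.map (fun r : List Int => r.take (grid.headD []).length)).getD i []).getD j 0
      = pvCell grid i j := pv_cell_rows grid _ i j hj'
  have eup : ((List.replicate (grid.headD []).length (0 : Int) ::
      (grid.map (fun r : List Int => r.take (grid.headD []).length)).dropLast).getD i []).getD j 0
      = pvNB grid grid.length (grid.headD []).length ((i : Int) - 1) j := by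
    rw [eU]
    by_cases h0 : i = 0
    · rw [if_pos h0, List.getD_replicate _ hj']
      unfold pvNB
      have hneg : ¬(0 ≤ (i : Int) - 1 ∧ (i : Int) - 1 < (grid.length : Int) ∧
          0 ≤ (j : Int) ∧ (j : Int) < ((grid.headD []).length : Int)) := by omega
      rw [if_neg hneg]
    · rw [if_neg h0, pv_cell_rows grid _ (i - 1) j hj']
      have hk : ((i : Int)) - 1 = ((i - 1 : Nat) : Int) := by omega
      rw [hk, pv_NB_in grid _ _ (i - 1) j (by omega) hj']
  have edown : (((grid.map (fun r : List Int => r.take (grid.headD []).length)).tail ++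
      [List.replicate (grid.headD []).length (0 : Int)]).getD i []).getD j 0
      = pvNB grid grid.length (grid.headD []).length ((i : Int) + 1) j := by
    rw [eD]
    by_cases hih : i + 1 < grid.length
    · rw [if_pos hih, pv_cell_rows grid _ (i + 1) j hj']
      have hk : ((i : Int) + 1) = ((i + 1 : Nat) : Int) := by push_cast; ring
      rw [hk, pv_NB_in grid _ _ (i + 1) j hih hj']
    · rw [if_neg hih, List.getD_replicate _ hj']
      unfold pvNB
      have hneg : ¬(0 ≤ (i : Int) + 1 ∧ (i : Int) + 1 < (grid.length : Int) ∧
          0 ≤ (j : Int) ∧ (j : Int) < ((grid.headD []).length : Int)) := by omega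
      rw [if_neg hneg]
  have eleft : ((0 : Int) :: ((grid.map (fun r : List Int => r.take (grid.headD []).length)).getD i []).dropLast).getD j 0
      = pvNB grid grid.length (grid.headD []).length i ((j : Int) - 1) := by
    rw [pv_left_getD _ _ j hcl hj']
    by_cases hj0 : j = 0
    · rw [if_pos hj0]
      unfold pvNB
      have hneg : ¬(0 ≤ (i : Int) ∧ (i : Int) < (grid.length : Int) ∧
          0 ≤ (j : Int) - 1 ∧ (j : Int) - 1 < ((grid.headD []).length : Int)) := by omega
      rw [if_neg hneg]
    · rw [if_neg hj0, pv_cell_rows grid _ i (j - 1) (by omega)]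
      have hk : ((j : Int)) - 1 = ((j - 1 : Nat) : Int) := by omega
      rw [hk, pv_NB_in grid _ _ i (j - 1) hi (by omega)]
  have eright : (((grid.map (fun r : List Int => r.take (grid.headD []).length)).getD i []).tail ++ [(0 : Int)]).getD j 0
      = pvNB grid grid.length (grid.headD []).length i ((j : Int) + 1) := by
    rw [pv_right_getD _ _ j hcl hj']
    by_cases hjw : j + 1 < (grid.headD []).length
    · rw [if_pos hjw, pv_cell_rows grid _ i (j + 1) hjw]
      have hk : ((j : Int) + 1) = ((j + 1 : Nat) : Int) := by push_cast; ring
      rw [hk, pv_NB_in grid _ _ i (j + 1) hi hjw]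
    · rw [if_neg hjw]
      unfold pvNB
      have hneg : ¬(0 ≤ (i : Int) ∧ (i : Int) < (grid.length : Int) ∧
          0 ≤ (j : Int) + 1 ∧ (j : Int) + 1 < ((grid.headD []).length : Int)) := by omega
      rw [if_neg hneg]
  rw [ecur, eup, edown, eleft, eright]
  unfold pvEP
  exact Iff.rfl

-- A equals the index-sum of pvEP
lemma pvA_eq (grid : List (List Int)) (hg : ¬(grid = [] ∨ grid.headD [] = [])) :
    count_edge_cells_py grid
      = (((List.range grid.length).map
          (fun i => (List.range (grid.headD []).length).countP
            (fun j => pvEP grid grid.length (grid.headD []).length i j))).sum : Nat) := by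
  unfold count_edge_cells_py
  rw [if_neg hg]
  dsimp only
  have hinner : ∀ i, i ∈ List.range grid.length → ∀ acc : Int,
      (List.range (grid.headD []).length).foldl (fun acc j =>
        if pvCell grid i j != 0 then
          if pvIsEdge grid grid.length (grid.headD []).length i j [(-1,0), (1,0), (0,-1), (0,1)] then acc + 1
          else acc
        else acc) acc
      = acc + ((List.range (grid.headD []).length).countP
          (fun j => pvEP grid grid.length (grid.headD []).length i j) : Nat) := by
    intro i hi acc
    rw [pv_foldl_count2]
    have hc : (List.range (grid.headD []).length).countP
        (fun j => (pvCell grid i j != 0) &&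
          pvIsEdge grid grid.length (grid.headD []).length i j [(-1,0), (1,0), (0,-1), (0,1)])
        = (List.range (grid.headD []).length).countP
          (fun j => pvEP grid grid.length (grid.headD []).length i j) := by
      apply List.countP_congr
      intro j hj
      have hj' : j < (grid.headD []).length := List.mem_range.mp hj
      have hi' : i < grid.length := List.mem_range.mp hi
      simp only [pvEP, pv_isEdge_eq grid _ _ i j hi' hj']
    rw [hc]
  rw [PySem.List.foldl_congr_mem' _ _ _ _ hinner, PySem.List.foldl_add]
  simp [List.map_map, Function.comp_def]

-- B equals the same index-sum of pvEP
lemma pvB_eq (grid : List (List Int)) (hg : ¬(grid = [] ∨ grid.headD [] = []))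
    (hp : ∀ r ∈ grid, (grid.headD []).length ≤ r.length) :
    count_edge_cells_py_alt grid
      = (((List.range grid.length).map
          (fun i => (List.range (grid.headD []).length).countP
            (fun j => pvEP grid grid.length (grid.headD []).length i j))).sum : Nat) := by
  have hne : grid ≠ [] := fun h => hg (Or.inl h)
  have hh : 1 ≤ grid.length := List.length_pos_iff.mpr hne
  have hw : 1 ≤ (grid.headD []).length := by
    have : grid.headD [] ≠ [] := fun h => hg (Or.inr h)
    exact List.length_pos_iff.mpr this
  unfold count_edge_cells_py_alt
  rw [if_neg hg]
  dsimp only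
  rw [pv_zip3_sum pvRowEdges
        (grid.map (fun r : List Int => r.take (grid.headD []).length))
        (List.replicate (grid.headD []).length 0 ::
          (grid.map (fun r : List Int => r.take (grid.headD []).length)).dropLast)
        ((grid.map (fun r : List Int => r.take (grid.headD []).length)).tail ++
          [List.replicate (grid.headD []).length 0])
        (by simp; omega) (by simp; omega)]
  rw [List.map_congr_left (fun i hi => pv_row_eq grid i (by simpa using List.mem_range.mp hi) hw hp)]
  simp [List.map_map, Function.comp_def, List.length_map]

-- ===== VERDICT (by name: the statement is the Claim_ definition above) =====
theorem count_edge_cells_py_spec : Claim_equal_count_edge_cells_py := by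
  intro grid _ hpre
  unfold Spec_count_edge_cells_py
  by_cases hg : grid = [] ∨ grid.headD [] = []
  · unfold count_edge_cells_py count_edge_cells_py_alt
    rw [if_pos hg, if_pos hg]
  · have hp : ∀ r ∈ grid, (grid.headD []).length ≤ r.length := by
      rcases hpre with h1 | h2 | h3
      · exact absurd (Or.inl h1) hg
      · exact absurd (Or.inr h2) hg
      · exact h3
    rw [pvA_eq grid hg, pvB_eq grid hg hp]
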